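-- pv_equiv track=rewrite | github.com/malvavisc0/aria | src/aria/tools/search/finance.py | _normalize_ticker
-- ===== SOURCE A (Python) =====
-- _CRYPTO_QUOTE_CURRENCIES = {
--     "USD",
--     "EUR",
--     "GBP",
--     "JPY",
--     "CHF",
--     "AUD",
--     "CAD",
-- }
--
-- def _normalize_ticker(ticker: str) -> str:
--     """Normalize common user-entered ticker variants.
--
--     This helps map user input to Yahoo Finance formats.
--     """
--     # Normalize ticker (uppercase, strip whitespace)
--     normalized = str(ticker).strip().upper()
--
--     # Support common pair delimiters for crypto/FX inputs.
--     # BTC/USD -> BTC-USD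
--     if "/" in normalized:
--         normalized = normalized.replace("/", "-")
--
--     # Crypto pairs are commonly entered without a dash.
--     # BTCUSD -> BTC-USD
--     if "-" not in normalized:
--         for quote in _CRYPTO_QUOTE_CURRENCIES:
--             if normalized.endswith(quote) and len(normalized) > len(quote):
--                 base = normalized[: -len(quote)]
--                 if 2 <= len(base) <= 6:
--                     normalized = f"{base}-{quote}"
--                 break
--
--     return normalized
-- ===== SOURCE B (Python) =====
-- _CRYPTO_QUOTE_CURRENCIES = {
--     "USD",
--     "EUR",
--     "GBP",
--     "JPY",
--     "CHF",
--     "AUD",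
--     "CAD",
-- }
--
-- def _normalize_ticker(ticker: str) -> str:
--     """Normalize common user-entered ticker variants (loop-free rewrite).
--
--     Every quote currency is exactly 3 characters long, so instead of scanning
--     the set with endswith we slice the last 3 characters off once and test set
--     membership directly.
--     """
--     normalized = str(ticker).strip().upper()
--     if "/" in normalized:
--         normalized = normalized.replace("/", "-")
--     if "-" not in normalized and len(normalized) > 3:
--         suffix = normalized[-3:]
--         if suffix in _CRYPTO_QUOTE_CURRENCIES and 2 <= len(normalized) - 3 <= 6:
--             normalized = f"{normalized[:-3]}-{suffix}"
--     return normalized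
-- ===== Notes on version B (the rewrite author's own statement) =====
-- stated objective: simpler
-- what changed: Replaces the endswith-loop over the quote-currency set with a single 3-character suffix slice and one set-membership test (valid because every quote currency has length 3).
import Mathlib
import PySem

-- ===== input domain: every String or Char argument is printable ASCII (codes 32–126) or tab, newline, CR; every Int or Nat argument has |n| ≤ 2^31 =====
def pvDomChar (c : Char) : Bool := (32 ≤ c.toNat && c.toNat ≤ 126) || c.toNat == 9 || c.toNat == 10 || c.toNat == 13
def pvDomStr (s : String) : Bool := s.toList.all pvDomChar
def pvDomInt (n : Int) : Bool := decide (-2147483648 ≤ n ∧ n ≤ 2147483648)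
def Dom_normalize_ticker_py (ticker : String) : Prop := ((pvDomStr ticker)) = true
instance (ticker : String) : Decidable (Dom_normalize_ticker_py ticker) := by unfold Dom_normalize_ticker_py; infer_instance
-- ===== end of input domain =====

-- B replaces A's endswith-loop over the quote-currency set by one 3-character
-- suffix slice plus a set-membership test (all quote currencies have length 3).


-- ===== PORT A =====
-- the module constant _CRYPTO_QUOTE_CURRENCIES (set iteration order is irrelevant:
-- at most one 3-character quote can be a suffix of a given string)
def pvCryptoQuotes : List String := ["USD", "EUR", "GBP", "JPY", "CHF", "AUD", "CAD"]

-- the 'for quote in _CRYPTO_QUOTE_CURRENCIES: … break' loop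
def pvALoop (normalized : String) : List String → String
  | [] => normalized
  | quote :: rest =>
    if PySem.Str.endswith normalized quote = true ∧
       PySem.Str.len normalized > PySem.Str.len quote then
      let base := PySem.Str.slice normalized none (some (-(PySem.Str.len quote)))
      if 2 ≤ PySem.Str.len base ∧ PySem.Str.len base ≤ 6 then
        base ++ "-" ++ quote
      else normalized
    else pvALoop normalized rest

def normalize_ticker_py (ticker : String) : String :=
  let normalized := PySem.Str.upper (PySem.Str.strip ticker)
  let normalized :=
    if PySem.Str.isIn "/" normalized = true then PySem.Str.replace normalized "/" "-"
    else normalized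
  if PySem.Str.isIn "-" normalized = false then pvALoop normalized pvCryptoQuotes
  else normalized

-- ===== PORT B =====
def pvCryptoQuoteSet : PySem.Set String :=
  PySem.Set.ofList ["USD", "EUR", "GBP", "JPY", "CHF", "AUD", "CAD"]

def normalize_ticker_py_alt (ticker : String) : String :=
  let normalized := PySem.Str.upper (PySem.Str.strip ticker)
  let normalized :=
    if PySem.Str.isIn "/" normalized = true then PySem.Str.replace normalized "/" "-"
    else normalized
  if PySem.Str.isIn "-" normalized = false ∧ PySem.Str.len normalized > 3 then
    let suffix := PySem.Str.slice normalized (some (-3)) none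
    if PySem.Set.contains pvCryptoQuoteSet suffix = true ∧
       2 ≤ PySem.Str.len normalized - 3 ∧ PySem.Str.len normalized - 3 ≤ 6 then
      PySem.Str.slice normalized none (some (-3)) ++ "-" ++ suffix
    else normalized
  else normalized

-- ===== PRECONDITION & SPEC =====
def Spec_normalize_ticker_py (ticker : String) (out : String) : Prop := out = normalize_ticker_py_alt ticker
instance (ticker : String) (out : String) : Decidable (Spec_normalize_ticker_py ticker out) := by unfold Spec_normalize_ticker_py; infer_instance

-- ===== CLAIM (what is proved, stated in full; the proofs are below) =====
def Claim_equal_normalize_ticker_py : Prop := ∀ (ticker : String), Dom_normalize_ticker_py ticker → Spec_normalize_ticker_py ticker (normalize_ticker_py ticker)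

-- ===== LEMMAS AND PROOFS =====

-- a 3-character string q is a suffix of n iff n's last-3-characters slice equals q
lemma pv_ends3 (n q : String) (hq : q.toList.length = 3) :
    (PySem.Str.endswith n q = true) ↔ n.toList.drop (n.toList.length - 3) = q.toList := by
  have hb : PySem.Str.endswith n q = PySem.Chars.endswith n.toList q.toList := by simp
  rw [hb, PySem.Chars.endswith_iff]
  constructor
  · intro h
    have := List.suffix_iff_eq_drop.mp h
    rw [hq] at this
    exact this.symm
  · intro h
    rw [List.suffix_iff_eq_drop, hq]
    exact h.symm

lemma pv_suffix_toList (n : String) :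
    (PySem.Str.slice n (some (-3)) none).toList = n.toList.drop (n.toList.length - 3) := by
  rw [PySem.Str.toList_slice, PySem.Chars.slice_eq_listSlice,
    PySem.List.slice_from_neg_ofNat n.toList 3 (by omega)]

lemma pv_base_toList (n : String) :
    (PySem.Str.slice n none (some (-3))).toList = n.toList.take (n.toList.length - 3) := by
  rw [PySem.Str.toList_slice, PySem.Chars.slice_eq_listSlice,
    PySem.List.slice_to_neg_ofNat n.toList 3 (by omega)]

lemma pv_len_toList (n : String) : PySem.Str.len n = (n.toList.length : Int) := by simp

-- a string of length ≤ 3 never triggers the loop body (every quote has 3 characters)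
lemma pv_loop_short (n : String) (qs : List String)
    (h3 : ∀ p ∈ qs, p.toList.length = 3) (hn : ¬ PySem.Str.len n > 3) :
    pvALoop n qs = n := by
  induction qs with
  | nil => rfl
  | cons p rest ih =>
    rw [pvALoop, if_neg, ih (fun x hx => h3 x (List.mem_cons_of_mem p hx))]
    rintro ⟨-, hgt⟩
    rw [pv_len_toList n, pv_len_toList p, h3 p List.mem_cons_self] at hgt
    rw [pv_len_toList n] at hn
    omega

-- if none of the quotes matches the last-3 slice, the loop returns its input
lemma pv_loop_none (n : String) (qs : List String)
    (h3 : ∀ p ∈ qs, p.toList.length = 3)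
    (hnone : ∀ p ∈ qs, n.toList.drop (n.toList.length - 3) ≠ p.toList) :
    pvALoop n qs = n := by
  induction qs with
  | nil => rfl
  | cons p rest ih =>
    rw [pvALoop, if_neg, ih (fun x hx => h3 x (List.mem_cons_of_mem p hx))
      (fun x hx => hnone x (List.mem_cons_of_mem p hx))]
    rintro ⟨he, -⟩
    exact hnone p List.mem_cons_self ((pv_ends3 n p (h3 p List.mem_cons_self)).mp he)

-- if some quote matches the last-3 slice, the loop rewrites exactly as B does
lemma pv_loop_match (n : String) (qs : List String) (q : String)
    (h3 : ∀ p ∈ qs, p.toList.length = 3) (hmem : q ∈ qs)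
    (hU : n.toList.drop (n.toList.length - 3) = q.toList) :
    pvALoop n qs =
      if PySem.Str.len n > 3 then
        (if 2 ≤ PySem.Str.len n - 3 ∧ PySem.Str.len n - 3 ≤ 6 then
          PySem.Str.slice n none (some (-3)) ++ "-" ++ q
        else n)
      else n := by
  have hL3 : 3 ≤ n.toList.length := by
    have := congrArg List.length hU
    simp only [List.length_drop] at this
    have hq3 : q.toList.length = 3 := h3 q hmem
    omega
  induction qs with
  | nil => cases hmem
  | cons p rest ih =>
    by_cases hp : n.toList.drop (n.toList.length - 3) = p.toList
    · have hpq : p = q := String.toList_inj.mp (by rw [← hp, hU])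
      subst hpq
      have hple : PySem.Str.len p = 3 := by
        rw [pv_len_toList, h3 p List.mem_cons_self]; norm_num
      have he : PySem.Str.endswith n p = true := (pv_ends3 n p (h3 p List.mem_cons_self)).mpr hp
      by_cases h3n : PySem.Str.len n > 3
      · rw [pvALoop, if_pos ⟨he, by rw [hple]; exact h3n⟩, if_pos h3n]
        simp only [hple]
        have hlb : PySem.Str.len (PySem.Str.slice n none (some (-3))) =
            PySem.Str.len n - 3 := by
          have h1 : (PySem.Str.slice n none (some (-3))).toList.length = n.toList.length - 3 := by
            rw [pv_base_toList, List.length_take]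
            omega
          rw [pv_len_toList, h1, pv_len_toList n]
          omega
        rw [hlb]
      · rw [pvALoop, if_neg (by rintro ⟨-, hgt⟩; rw [hple] at hgt; exact h3n hgt),
          if_neg h3n, pv_loop_short n rest (fun x hx => h3 x (List.mem_cons_of_mem p hx)) h3n]
    · have he : ¬ (PySem.Str.endswith n p = true) :=
        fun h => hp ((pv_ends3 n p (h3 p List.mem_cons_self)).mp h)
      rw [pvALoop, if_neg (fun h => he h.1)]
      have hq_rest : q ∈ rest := by
        rcases List.mem_cons.mp hmem with rfl | h
        · exact absurd hU hp
        · exact h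
      exact ih (fun x hx => h3 x (List.mem_cons_of_mem p hx)) hq_rest

lemma pv_main (n : String) :
    pvALoop n pvCryptoQuotes =
      if PySem.Str.len n > 3 then
        (if PySem.Set.contains pvCryptoQuoteSet (PySem.Str.slice n (some (-3)) none) = true ∧
            2 ≤ PySem.Str.len n - 3 ∧ PySem.Str.len n - 3 ≤ 6 then
          PySem.Str.slice n none (some (-3)) ++ "-" ++ PySem.Str.slice n (some (-3)) none
        else n)
      else n := by
  have h3 : ∀ p ∈ pvCryptoQuotes, p.toList.length = 3 := by decide
  by_cases hmatch : ∃ q ∈ pvCryptoQuotes, n.toList.drop (n.toList.length - 3) = q.toList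
  · obtain ⟨q, hq, hU⟩ := hmatch
    have hsfx : PySem.Str.slice n (some (-3)) none = q :=
      String.toList_inj.mp (by rw [pv_suffix_toList, hU])
    have hcq : PySem.Set.contains pvCryptoQuoteSet q = true := by
      rw [PySem.Set.contains_iff]
      simp only [pvCryptoQuoteSet, PySem.Set.mem_ofList]
      exact hq
    rw [pv_loop_match n pvCryptoQuotes q h3 hq hU, hsfx]
    simp only [hcq, true_and]
  · push Not at hmatch
    rw [pv_loop_none n pvCryptoQuotes h3 hmatch]
    split_ifs with h1 h2
    · exfalso
      have hsl : (PySem.Str.slice n (some (-3)) none) ∈ pvCryptoQuotes := by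
        have := h2.1
        rw [PySem.Set.contains_iff] at this
        simpa only [pvCryptoQuoteSet, PySem.Set.mem_ofList] using this
      exact hmatch _ hsl (pv_suffix_toList n).symm
    · rfl
    · rfl

lemma pv_top (r : String) :
    (if PySem.Str.isIn "-" r = false then pvALoop r pvCryptoQuotes else r) =
    (if PySem.Str.isIn "-" r = false ∧ PySem.Str.len r > 3 then
      (if PySem.Set.contains pvCryptoQuoteSet (PySem.Str.slice r (some (-3)) none) = true ∧
          2 ≤ PySem.Str.len r - 3 ∧ PySem.Str.len r - 3 ≤ 6 then
        PySem.Str.slice r none (some (-3)) ++ "-" ++ PySem.Str.slice r (some (-3)) none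
      else r)
    else r) := by
  by_cases hd : PySem.Str.isIn "-" r = false
  · rw [if_pos hd]
    by_cases h3 : PySem.Str.len r > 3
    · rw [if_pos (⟨hd, h3⟩ : _ ∧ _), pv_main r, if_pos h3]
    · rw [pv_main r, if_neg h3, if_neg (fun h => h3 h.2)]
  · rw [if_neg hd, if_neg (fun h => hd h.1)]

-- ===== VERDICT (by name: the statement is the Claim_ definition above) =====
theorem normalize_ticker_py_spec : Claim_equal_normalize_ticker_py := by
  intro ticker _
  show normalize_ticker_py ticker = normalize_ticker_py_alt ticker
  unfold normalize_ticker_py normalize_ticker_py_alt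
  exact pv_top _
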